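-- pv_equiv track=rewrite | github.com/hakidon/Ansible-testbed | be/ansible/custom-parser/library/custom_parse_command.py | process_environment_power
-- ===== SOURCE A (Python) =====
-- def process_environment_power(response):
--     lines = response.splitlines()
--     temp_str = []
--
--     for line in lines:
--         if line.strip() and line[0].isdigit():
--             num = line.split()[0]
--             status = line.split()[-1].strip()
--             temp_str.append(f"{num} = {status}")
--         elif temp_str:
--             break
--
--     return ', '.join(temp_str)
-- ===== SOURCE B (Python) =====
-- def process_environment_power(response):
--     def ok(line):
--         return bool(line.strip()) and line[0].isdigit()
--
--     lines = response.splitlines()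
--     start = 0
--     while start < len(lines) and not ok(lines[start]):
--         start += 1
--     end = start
--     while end < len(lines) and ok(lines[end]):
--         end += 1
--     return ', '.join(f"{l.split()[0]} = {l.split()[-1].strip()}" for l in lines[start:end])
-- ===== Notes on version B (the rewrite author's own statement) =====
-- stated objective: alternative
-- what changed: Replaces the stateful loop with an append-accumulator and a break guarded by the accumulator's emptiness by a two-phase index scan (skip the non-matching prefix, then measure the contiguous matching run), a slice, and a join over a generator.
import Mathlib
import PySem

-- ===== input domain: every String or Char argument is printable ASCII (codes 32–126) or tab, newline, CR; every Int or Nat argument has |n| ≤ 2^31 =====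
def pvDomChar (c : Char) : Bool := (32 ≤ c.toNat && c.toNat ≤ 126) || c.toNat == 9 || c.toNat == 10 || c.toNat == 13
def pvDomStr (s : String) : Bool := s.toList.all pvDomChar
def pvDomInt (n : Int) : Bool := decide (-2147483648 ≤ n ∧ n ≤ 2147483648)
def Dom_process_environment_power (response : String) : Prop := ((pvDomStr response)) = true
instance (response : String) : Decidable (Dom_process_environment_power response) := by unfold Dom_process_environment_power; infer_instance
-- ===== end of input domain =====

-- B replaces A's stateful append-and-break loop by a two-phase index scan plus slice; same values, same cost (objective: alternative).

-- shared predicate `line.strip() and line[0].isdigit()` (inline in A's if; B's `ok`)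
def pvOk (line : String) : Bool :=
  (PySem.Str.strip line != "") &&
    (match PySem.Str.pyGet? line 0 with
     | some c => PySem.Chars.isdigit c
     | none => false)

-- shared line formatter `f"{line.split()[0]} = {line.split()[-1].strip()}"`
def pvFmt (line : String) : String :=
  (PySem.List.pyGet? (PySem.Str.split₀ line) 0).getD "" ++ " = " ++
    PySem.Str.strip ((PySem.List.pyGet? (PySem.Str.split₀ line) (-1)).getD "")

-- ===== PORT A =====
def pvLoopA : List String → List String → List String
  | [], acc => acc
  | line :: rest, acc =>
    if pvOk line then
      pvLoopA rest (acc ++ [pvFmt line])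
    else if !acc.isEmpty then acc
    else pvLoopA rest acc

def process_environment_power (response : String) : String :=
  PySem.Str.join ", " (pvLoopA (PySem.Str.splitlines response) [])

-- ===== PORT B =====
-- `while i < len(lines) and p(lines[i]): i += 1`
def pvScan (lines : List String) (p : String → Bool) (i : Nat) : Nat :=
  if h : i < lines.length then
    if p lines[i] then pvScan lines p (i + 1) else i
  else i
termination_by lines.length - i

def process_environment_power_alt (response : String) : String :=
  let lines := PySem.Str.splitlines response
  let start := pvScan lines (fun l => !pvOk l) 0
  let stop := pvScan lines pvOk start
  PySem.Str.join ", "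
    ((PySem.List.slice lines (some (start : Int)) (some (stop : Int))).map pvFmt)

-- ===== PRECONDITION & SPEC =====
def Spec_process_environment_power (response : String) (out : String) : Prop := out = process_environment_power_alt response
instance (response : String) (out : String) : Decidable (Spec_process_environment_power response out) := by unfold Spec_process_environment_power; infer_instance

-- ===== CLAIM (what is proved, stated in full; the proofs are below) =====
def Claim_equal_process_environment_power : Prop := ∀ (response : String), Dom_process_environment_power response → Spec_process_environment_power response (process_environment_power response)

-- ===== LEMMAS AND PROOFS =====

theorem pvScan_eq (lines : List String) (p : String → Bool) (i : Nat) (h : i ≤ lines.length) :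
    pvScan lines p i = i + ((lines.drop i).takeWhile p).length := by
  by_cases hlt : i < lines.length
  · rw [pvScan]
    have hd : lines.drop i = lines[i] :: lines.drop (i + 1) := List.drop_eq_getElem_cons hlt
    by_cases hp : p lines[i] = true
    · simp only [hlt, dif_pos, hp, if_pos]
      rw [pvScan_eq lines p (i + 1) hlt, hd]
      simp [List.takeWhile, hp]
      omega
    · rw [pvScan]
      simp only [hlt, dif_pos]
      have hp' : p lines[i] = false := by simpa using hp
      rw [if_neg hp, hd]
      simp [List.takeWhile, hp']
  · have : i = lines.length := by omega
    subst this
    rw [pvScan]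
    simp
termination_by lines.length - i

theorem drop_length_takeWhile (p : String → Bool) (l : List String) :
    l.drop ((l.takeWhile p).length) = l.dropWhile p := by
  induction l with
  | nil => simp
  | cons x xs ih =>
    by_cases hp : p x = true <;> simp [List.takeWhile, List.dropWhile, hp, ih]

theorem pvLoopA_ne (lines : List String) (acc : List String) (h : acc ≠ []) :
    pvLoopA lines acc = acc ++ (lines.takeWhile pvOk).map pvFmt := by
  induction lines generalizing acc with
  | nil => simp [pvLoopA]
  | cons line rest ih =>
    by_cases hp : pvOk line = true
    · rw [pvLoopA, if_pos hp, ih _ (by simp)]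
      simp [List.takeWhile, hp]
    · rw [pvLoopA, if_neg hp]
      have : acc.isEmpty = false := by simpa [List.isEmpty_iff] using h
      simp [this, List.takeWhile, hp]

theorem pvLoopA_nil (lines : List String) :
    pvLoopA lines [] = ((lines.dropWhile (fun l => !pvOk l)).takeWhile pvOk).map pvFmt := by
  induction lines with
  | nil => simp [pvLoopA]
  | cons line rest ih =>
    by_cases hp : pvOk line = true
    · rw [pvLoopA, if_pos hp, List.nil_append, pvLoopA_ne rest [pvFmt line] (by simp)]
      simp [List.dropWhile, hp]
    · rw [pvLoopA, if_neg hp]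
      simpa [List.dropWhile, hp] using ih

-- ===== VERDICT (by name: the statement is the Claim_ definition above) =====
theorem process_environment_power_spec : Claim_equal_process_environment_power := by
  intro response _
  unfold Spec_process_environment_power process_environment_power process_environment_power_alt
  set lines := PySem.Str.splitlines response with hl
  show PySem.Str.join ", " (pvLoopA lines []) =
    PySem.Str.join ", " ((PySem.List.slice lines
      (some ((pvScan lines (fun l => !pvOk l) 0 : Nat) : Int))
      (some ((pvScan lines pvOk (pvScan lines (fun l => !pvOk l) 0) : Nat) : Int))).map pvFmt)
  have hstart : pvScan lines (fun l => !pvOk l) 0 = (lines.takeWhile (fun l => !pvOk l)).length := by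
    rw [pvScan_eq lines _ 0 (by omega)]; simp
  have hdrop : lines.drop (pvScan lines (fun l => !pvOk l) 0) = lines.dropWhile (fun l => !pvOk l) := by
    rw [hstart, drop_length_takeWhile]
  have hstop : pvScan lines pvOk (pvScan lines (fun l => !pvOk l) 0) =
      pvScan lines (fun l => !pvOk l) 0 + ((lines.dropWhile (fun l => !pvOk l)).takeWhile pvOk).length := by
    rw [pvScan_eq lines pvOk _ (by rw [hstart]; exact (List.takeWhile_prefix _).length_le), hdrop]
  rw [hstop, Nat.cast_add, PySem.List.slice_natCast_add, hdrop, pvLoopA_nil]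
  congr 1
  have hpref : (lines.dropWhile (fun l => !pvOk l)).takeWhile pvOk <+: lines.dropWhile (fun l => !pvOk l) :=
    List.takeWhile_prefix _
  exact congrArg (List.map pvFmt) (List.prefix_iff_eq_take.mp hpref)
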